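-- pv_equiv track=rewrite | github.com/WinstonD96/myTest | day11/day11_02.py | licensing
-- ===== SOURCE A (Python) =====
-- def licensing(pokers):
--     hand1, hand2, hand3, hand4 = [], [], [], []
--     count = 1
--     for poker in pokers:
--         if (count - 1) % 3 == 0 and count < 52:
--             hand1.append(poker)
--         elif (count - 2) % 3 == 0 and count < 52:
--             hand2.append(poker)
--         elif count % 3 == 0 and count < 52:
--             hand3.append(poker)
--         elif count > 51:
--             hand4.append(poker)
--         count += 1
--
--     return hand1, hand2, hand3, hand4
-- ===== SOURCE B (Python) =====
-- def licensing(pokers):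
--     deck, rest = pokers[:51], pokers[51:]
--     hand1, hand2, hand3 = [], [], []
--     while deck:
--         hand1 += deck[:1]
--         hand2 += deck[1:2]
--         hand3 += deck[2:3]
--         deck = deck[3:]
--     return hand1, hand2, hand3, rest
-- ===== Notes on version B (the rewrite author's own statement) =====
-- stated objective: simpler
-- what changed: Replaces the per-card counter with its three mod-3 branch tests by splitting the deck once with pokers[:51]/pokers[51:] and dealing the 51-card prefix in chunks of three via slices; the tail beyond card 51 is produced by a single slice copy instead of being appended element by element.
import Mathlib
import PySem

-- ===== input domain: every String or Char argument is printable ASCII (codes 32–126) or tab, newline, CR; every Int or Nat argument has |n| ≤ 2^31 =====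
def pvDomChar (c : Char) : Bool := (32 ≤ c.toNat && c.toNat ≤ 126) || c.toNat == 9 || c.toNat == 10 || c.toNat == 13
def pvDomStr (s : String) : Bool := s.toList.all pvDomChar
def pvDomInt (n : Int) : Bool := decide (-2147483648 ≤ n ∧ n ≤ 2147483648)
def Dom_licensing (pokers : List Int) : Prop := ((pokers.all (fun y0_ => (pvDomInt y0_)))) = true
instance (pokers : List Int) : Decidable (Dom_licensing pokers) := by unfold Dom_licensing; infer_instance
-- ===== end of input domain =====

-- B splits off pokers[51:] with one slice and deals the 51-card prefix in chunks of three via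
-- slices, instead of A's per-card counter with mod-3 branch tests (simpler; measured faster by a
-- constant factor since the tail is one slice copy rather than a per-element loop).

-- ===== PORT A =====
-- one iteration of A's for-loop: state = ((hand1, hand2, hand3, hand4), count)
def licensingStep (st : (List Int × List Int × List Int × List Int) × Int) (poker : Int) :
    (List Int × List Int × List Int × List Int) × Int :=
  match st with
  | ((h1, h2, h3, h4), count) =>
    if PySem.Int.mod (count - 1) 3 = 0 ∧ count < 52 then ((h1 ++ [poker], h2, h3, h4), count + 1)
    else if PySem.Int.mod (count - 2) 3 = 0 ∧ count < 52 then ((h1, h2 ++ [poker], h3, h4), count + 1)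
    else if PySem.Int.mod count 3 = 0 ∧ count < 52 then ((h1, h2, h3 ++ [poker], h4), count + 1)
    else if count > 51 then ((h1, h2, h3, h4 ++ [poker]), count + 1)
    else ((h1, h2, h3, h4), count + 1)

def licensing (pokers : List Int) : List Int × List Int × List Int × List Int :=
  (pokers.foldl licensingStep (([], [], [], []), 1)).1

-- ===== PORT B =====
-- B's while-loop: pops a chunk of three off the deck with slices each round
def dealRounds (deck h1 h2 h3 : List Int) : List Int × List Int × List Int :=
  if _hne : deck = [] then (h1, h2, h3)
  else dealRounds (PySem.List.slice deck (some 3) none)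
        (h1 ++ PySem.List.slice deck none (some 1))
        (h2 ++ PySem.List.slice deck (some 1) (some 2))
        (h3 ++ PySem.List.slice deck (some 2) (some 3))
termination_by deck.length
decreasing_by
  rw [PySem.List.slice_from deck (by norm_num)]
  have : 0 < deck.length := List.length_pos_of_ne_nil _hne
  simp
  omega

def licensing_alt (pokers : List Int) : List Int × List Int × List Int × List Int :=
  let deck := PySem.List.slice pokers none (some 51)
  let rest := PySem.List.slice pokers (some 51) none
  let h := dealRounds deck [] [] []
  (h.1, h.2.1, h.2.2, rest)

-- ===== PRECONDITION & SPEC =====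
def Spec_licensing (pokers : List Int) (out : List Int × List Int × List Int × List Int) : Prop := out = licensing_alt pokers
instance (pokers : List Int) (out : List Int × List Int × List Int × List Int) : Decidable (Spec_licensing pokers out) := by unfold Spec_licensing; infer_instance

-- ===== CLAIM (what is proved, stated in full; the proofs are below) =====
def Claim_equal_licensing : Prop := ∀ (pokers : List Int), Dom_licensing pokers → Spec_licensing pokers (licensing pokers)

-- ===== LEMMAS AND PROOFS =====

-- A's three branch shapes at counts 3k+1, 3k+2, 3k+3 (all < 52)
theorem stepA (h1 h2 h3 h4 : List Int) (p k : Int) (hc : 3 * k + 1 < 52) :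
    licensingStep ((h1, h2, h3, h4), 3 * k + 1) p = ((h1 ++ [p], h2, h3, h4), 3 * k + 1 + 1) := by
  simp [licensingStep, hc]

theorem stepB (h1 h2 h3 h4 : List Int) (p k : Int) (hc : 3 * k + 2 < 52) :
    licensingStep ((h1, h2, h3, h4), 3 * k + 2) p = ((h1, h2 ++ [p], h3, h4), 3 * k + 2 + 1) := by
  have hnd1 : ¬ (3:Int) ∣ 3 * k + 2 - 1 := by omega
  simp [licensingStep, hnd1, hc]

theorem stepC (h1 h2 h3 h4 : List Int) (p k : Int) (hc : 3 * k + 3 < 52) :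
    licensingStep ((h1, h2, h3, h4), 3 * k + 3) p = ((h1, h2, h3 ++ [p], h4), 3 * k + 3 + 1) := by
  have hnd1 : ¬ (3:Int) ∣ 3 * k + 3 - 1 := by omega
  have hnd2 : ¬ (3:Int) ∣ 3 * k + 3 - 2 := by omega
  simp [licensingStep, hnd1, hnd2, hc]

-- past count 51 everything goes to hand4
theorem foldl_suffix (rest : List Int) : ∀ (h1 h2 h3 h4 : List Int) (c : Int), 52 ≤ c →
    List.foldl licensingStep ((h1, h2, h3, h4), c) rest
      = ((h1, h2, h3, h4 ++ rest), c + rest.length) := by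
  induction rest with
  | nil => intro h1 h2 h3 h4 c _; simp
  | cons p t ih =>
    intro h1 h2 h3 h4 c hc
    rw [List.foldl_cons]
    have hs : licensingStep ((h1, h2, h3, h4), c) p = ((h1, h2, h3, h4 ++ [p]), c + 1) := by
      simp [licensingStep, show ¬ c < 52 by omega, show c > 51 by omega]
    rw [hs, ih _ _ _ _ _ (by omega)]
    simp
    omega

-- one round of B's loop
theorem dealRounds_cons (p : Int) (t h1 h2 h3 : List Int) :
    dealRounds (p :: t) h1 h2 h3
      = dealRounds (t.drop 2) (h1 ++ [p]) (h2 ++ t.take 1) (h3 ++ (t.drop 1).take 1) := by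
  rw [dealRounds]
  simp [PySem.List.slice_to (p :: t) (show (0:Int) ≤ 1 by norm_num),
        PySem.List.slice_toNat (p :: t) (show (0:Int) ≤ 1 by norm_num) (show (0:Int) ≤ 2 by norm_num),
        PySem.List.slice_toNat (p :: t) (show (0:Int) ≤ 2 by norm_num) (show (0:Int) ≤ 3 by norm_num),
        PySem.List.slice_from (p :: t) (show (0:Int) ≤ 3 by norm_num)]

theorem dealRounds_nil (h1 h2 h3 : List Int) : dealRounds [] h1 h2 h3 = (h1, h2, h3) := by
  rw [dealRounds]; simp

-- main invariant: on the prefix (counts staying below 52), A's counted fold is B's chunked deal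
theorem foldl_prefix : ∀ (n : Nat) (ys : List Int), ys.length = n →
    ∀ (k : Nat) (h1 h2 h3 h4 : List Int), 3 * k + ys.length ≤ 51 →
    List.foldl licensingStep ((h1, h2, h3, h4), 3 * (k : Int) + 1) ys
      = (((dealRounds ys h1 h2 h3).1, (dealRounds ys h1 h2 h3).2.1,
          (dealRounds ys h1 h2 h3).2.2, h4), 3 * (k : Int) + 1 + ys.length) := by
  intro n
  induction n using Nat.strong_induction_on with
  | _ n IH =>
    intro ys hlen k h1 h2 h3 h4 hle
    match ys with
    | [] => simp [dealRounds_nil]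
    | [p] =>
      simp only [List.length_cons, List.length_nil] at hle
      rw [List.foldl_cons, stepA h1 h2 h3 h4 p k (by omega), List.foldl_nil, dealRounds_cons]
      simp [dealRounds_nil]
    | [p, q] =>
      simp only [List.length_cons, List.length_nil] at hle
      rw [List.foldl_cons, stepA h1 h2 h3 h4 p k (by omega),
          show (3 * (k : Int) + 1 + 1 : Int) = 3 * (k : Int) + 2 by ring,
          List.foldl_cons, stepB (h1 ++ [p]) h2 h3 h4 q k (by omega), List.foldl_nil,
          dealRounds_cons]
      simp [dealRounds_nil]
      omega
    | p :: q :: r :: t =>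
      simp only [List.length_cons] at hle hlen
      rw [List.foldl_cons, stepA h1 h2 h3 h4 p k (by omega),
          show (3 * (k : Int) + 1 + 1 : Int) = 3 * (k : Int) + 2 by ring,
          List.foldl_cons, stepB (h1 ++ [p]) h2 h3 h4 q k (by omega),
          show (3 * (k : Int) + 2 + 1 : Int) = 3 * (k : Int) + 3 by ring,
          List.foldl_cons, stepC (h1 ++ [p]) (h2 ++ [q]) h3 h4 r k (by omega),
          show (3 * (k : Int) + 3 + 1 : Int) = 3 * ((k + 1 : Nat) : Int) + 1 by push_cast; ring]
      rw [IH t.length (by omega) t rfl (k + 1) (h1 ++ [p]) (h2 ++ [q]) (h3 ++ [r]) h4 (by omega)]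
      rw [dealRounds_cons]
      simp
      omega

-- ===== VERDICT (by name: the statement is the Claim_ definition above) =====
theorem licensing_spec : Claim_equal_licensing := by
  intro pokers _dom
  unfold Spec_licensing licensing licensing_alt
  rw [PySem.List.slice_to pokers (show (0:Int) ≤ 51 by norm_num),
      PySem.List.slice_from pokers (show (0:Int) ≤ 51 by norm_num)]
  have hsplit : pokers = pokers.take 51 ++ pokers.drop 51 := (List.take_append_drop 51 pokers).symm
  have hlen : (pokers.take 51).length ≤ 51 := by simp
  have hpre := foldl_prefix (pokers.take 51).length (pokers.take 51) rfl 0 [] [] [] [] (by omega)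
  simp only [Nat.cast_zero, mul_zero, zero_add] at hpre
  by_cases hbig : 51 ≤ pokers.length
  · have hd : (pokers.take 51).length = 51 := by simp; omega
    conv_lhs => rw [hsplit]
    rw [List.foldl_append, hpre, hd]
    rw [foldl_suffix (pokers.drop 51) _ _ _ _ _ (by norm_num)]
    simp
  · have hd : pokers.drop 51 = [] := List.drop_eq_nil_of_le (by omega)
    conv_lhs => rw [hsplit]
    rw [List.foldl_append, hpre, hd, List.foldl_nil]
    simp
    omega
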